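-- pv_equiv track=rewrite | github.com/JakeSaunders1995/comp16321MarkingMid | CW_spell/spellcheck_r27413tj/spellchecker_r27413tj.py | rem_num
-- ===== SOURCE A (Python) =====
-- def rem_num(list):
--     num_list=['0','1','2','3','4','5','6','7','8','9']
--     count=0
--     for i in range(len(list)):
--         for j in range (len(num_list)):
--             if(num_list[j] in list[i][0]):
--                 list[i][0]=(list[i][0]).replace(num_list[j],'')
--                 count+=1
--     return count
-- ===== SOURCE B (Python) =====
-- # Same return value as A: per row, adds the number of DISTINCT ASCII digits present in
-- # row[0]; also performs A's in-place mutation (stripping the digits from row[0]).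
-- def rem_num(list):
--     digits = '0123456789'
--     count = 0
--     for i in range(len(list)):
--         s = list[i][0]
--         count += len(set(s) & set(digits))
--         list[i][0] = ''.join(c for c in s if c not in digits)
--     return count
-- ===== Notes on version B (the rewrite author's own statement) =====
-- stated objective: idiomatic
-- what changed: A scans each string ten times (one 'in' test plus a replace per digit); B does one set-intersection pass per string, adding len(set(s) & set('0123456789')) and stripping all digits in a single comprehension.
import Mathlib
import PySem

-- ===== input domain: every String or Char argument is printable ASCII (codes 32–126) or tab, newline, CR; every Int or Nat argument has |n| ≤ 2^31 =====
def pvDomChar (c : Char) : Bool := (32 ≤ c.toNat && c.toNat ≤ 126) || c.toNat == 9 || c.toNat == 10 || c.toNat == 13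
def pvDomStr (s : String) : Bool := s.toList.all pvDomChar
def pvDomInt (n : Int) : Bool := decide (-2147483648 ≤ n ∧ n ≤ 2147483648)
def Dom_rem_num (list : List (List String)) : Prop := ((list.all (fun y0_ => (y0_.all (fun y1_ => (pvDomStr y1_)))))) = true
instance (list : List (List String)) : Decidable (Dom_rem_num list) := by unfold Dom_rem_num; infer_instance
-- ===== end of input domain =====

-- B replaces A's ten isIn/replace scans per row by one pass computing the set of digits
-- present (objective: idiomatic). A mutates list[i][0] in place; the Python B performs
-- the same mutation; the equivalence proved here is about the RETURN value.

-- ===== PORT A =====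
-- list[i][0] is totalized with headD ""; Pre_rem_num excludes the empty inner lists
-- on which Python raises IndexError, so the default is never reached inside Pre_.
def rem_num (list : List (List String)) : Int :=
  let num_list : List String := ["0","1","2","3","4","5","6","7","8","9"]
  (list.foldl
    (fun (count : Int) (row : List String) =>
      (num_list.foldl
        (fun (st : String × Int) (d : String) =>
          if PySem.Str.isIn d st.1 then (PySem.Str.replace st.1 d "", st.2 + 1) else st)
        (row.headD "", count)).2)
    0)

-- ===== PORT B =====
-- per row: count += len(set(s) & set(digits)); the stripped string is assigned back to
-- list[i][0] in Python (mutation only) and does not contribute to the return value.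
def rem_num_alt (list : List (List String)) : Int :=
  let digits : String := "0123456789"
  list.foldl
    (fun (count : Int) (row : List String) =>
      count +
        PySem.Set.len
          (PySem.Set.inter (PySem.Set.ofList (row.headD "").toList)
            (PySem.Set.ofList digits.toList)))
    0

-- ===== PRECONDITION & SPEC =====
-- Pre_ excludes exactly the inputs with an empty inner list, on which Python A raises IndexError at list[i][0].
def Pre_rem_num (list : List (List String)) : Prop := ∀ row ∈ list, row ≠ []
instance (list : List (List String)) : Decidable (Pre_rem_num list) := by unfold Pre_rem_num; infer_instance
def pvWitness_rem_num : List (List String) := [["a1b22", "x"], ["no digits"]]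
def Spec_rem_num (list : List (List String)) (out : Int) : Prop := out = rem_num_alt list
instance (list : List (List String)) (out : Int) : Decidable (Spec_rem_num list out) := by unfold Spec_rem_num; infer_instance

-- ===== CLAIM (what is proved, stated in full; the proofs are below) =====
def Claim_equal_rem_num : Prop := ∀ (list : List (List String)), Dom_rem_num list → Pre_rem_num list → Spec_rem_num list (rem_num list)

-- ===== LEMMAS AND PROOFS =====

-- A's per-row inner loop, restated on List Char: remove all copies of d, count +1 if present.
def remStepC (st : List Char × Int) (d : Char) : List Char × Int :=
  if st.1.contains d then (st.1.filter (fun c => c != d), st.2 + 1) else st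

-- replace.go with a single-char pattern and empty replacement filters that char out
theorem replace_go_filter (d : Char) : ∀ (fuel : Nat) (l acc : List Char), l.length ≤ fuel →
    PySem.Chars.replace.go [d] [] fuel l acc = acc.reverse ++ l.filter (fun c => c != d) := by
  intro fuel
  induction fuel with
  | zero =>
    intro l acc h
    cases l with
    | nil => simp [PySem.Chars.replace.go]
    | cons c t => simp at h
  | succ n ih =>
    intro l acc h
    cases l with
    | nil => simp [PySem.Chars.replace.go]
    | cons c t =>
      simp only [PySem.Chars.replace.go]
      by_cases hc : c = d
      · subst hc
        have hpre : List.isPrefixOf [c] (c :: t) = true := by simp [List.isPrefixOf]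
        simp only [hpre, if_true]
        rw [ih _ _ (by simpa using Nat.le_of_succ_le_succ h)]
        simp
      · have hpre : List.isPrefixOf [d] (c :: t) = false := by
          simp [List.isPrefixOf]
          exact fun h' => (hc h'.symm).elim
        simp only [hpre, Bool.false_eq_true, if_false]
        rw [ih _ _ (by simpa using Nat.le_of_succ_le_succ h)]
        simp [hc]

theorem replace_single (s : String) (d : Char) :
    (PySem.Str.replace s (String.ofList [d]) "").toList = s.toList.filter (fun c => c != d) := by
  rw [PySem.Str.toList_replace]
  simp only [String.toList_ofList]
  show PySem.Chars.replace s.toList [d] "".toList = _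
  have : ("" : String).toList = ([] : List Char) := rfl
  rw [this, PySem.Chars.replace]
  simp only [List.isEmpty_cons, Bool.false_eq_true, if_false]
  exact (replace_go_filter d s.toList.length s.toList [] le_rfl).trans (by simp)

theorem isIn_single (s : String) (d : Char) :
    PySem.Str.isIn (String.ofList [d]) s = s.toList.contains d := by
  simp only [PySem.Str.isIn_eq, String.toList_ofList]
  by_cases h : d ∈ s.toList
  · have h1 : PySem.Chars.isIn [d] s.toList = true :=
      (PySem.Chars.isIn_iff_infix _ _).mpr ((List.singleton_infix_iff d s.toList).mpr h)
    simp [h1, h]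
  · have h1 : PySem.Chars.isIn [d] s.toList = false :=
      (PySem.Chars.isIn_eq_false_iff _ _).mpr
        (fun hin => h ((List.singleton_infix_iff d s.toList).mp hin))
    simp [h1, h]

-- A's inner String fold simulates the char-level fold
theorem innerA_sim (ds : List Char) : ∀ (s : String) (c : Int),
    ((ds.map (fun d => String.ofList [d])).foldl
        (fun (st : String × Int) (d : String) =>
          if PySem.Str.isIn d st.1 then (PySem.Str.replace st.1 d "", st.2 + 1) else st)
        (s, c)).2 = (ds.foldl remStepC (s.toList, c)).2 := by
  induction ds with
  | nil => intro s c; rfl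
  | cons d t ih =>
    intro s c
    simp only [List.map_cons, List.foldl_cons, remStepC]
    rw [isIn_single s d]
    by_cases h : s.toList.contains d
    · simp only [h, if_true]
      have hrep : PySem.Str.replace s (String.ofList [d]) ""
          = String.ofList (s.toList.filter (fun c => c != d)) := by
        apply String.ext
        rw [replace_single]
        simp
      rw [hrep, ih]
      simp
    · simp only [h, Bool.false_eq_true, if_false]
      exact ih s c

-- the char-level fold counts the digits of ds present in the original string
theorem innerC_count : ∀ (ds : List Char), ds.Nodup → ∀ (cs : List Char) (c : Int),
    (ds.foldl remStepC (cs, c)).2 = c + ((ds.filter (fun d => cs.contains d)).length : Int) := by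
  intro ds
  induction ds with
  | nil => intro _ cs c; simp
  | cons d t ih =>
    intro hnd cs c
    have hnd' : t.Nodup := hnd.of_cons
    have hdt : d ∉ t := (List.nodup_cons.mp hnd).1
    simp only [List.foldl_cons, remStepC, List.filter_cons]
    by_cases h : cs.contains d
    · simp only [h, if_true]
      rw [ih hnd']
      have hfc : t.filter (fun d' => (cs.filter (fun c => c != d)).contains d')
           = t.filter (fun d' => cs.contains d') := by
        apply List.filter_congr
        intro d' hd'
        have hne : d' ≠ d := fun he => hdt (he ▸ hd')
        rw [Bool.eq_iff_iff]
        simp [List.mem_filter, hne]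
      rw [hfc]
      simp only [List.length_cons]
      push_cast
      ring
    · simp only [h, Bool.false_eq_true, if_false]
      rw [ih hnd']

-- the number of ds-digits present equals the size of set(s) & set(ds)
theorem count_eq (cs ds : List Char) (hds : ds.Nodup) :
    ((ds.filter (fun d => cs.contains d)).length : Int)
      = PySem.Set.len (PySem.Set.inter (PySem.Set.ofList cs) (PySem.Set.ofList ds)) := by
  unfold PySem.Set.len PySem.Set.inter
  congr 1
  have h1 : (ds.filter (fun d => cs.contains d)).Nodup := hds.filter _
  have h2 : ((PySem.Set.ofList cs).filter (fun x => (PySem.Set.ofList ds).contains x)).Nodup :=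
    (PySem.Set.nodup_ofList cs).filter _
  rw [← List.toFinset_card_of_nodup h1, ← List.toFinset_card_of_nodup h2]
  congr 1
  ext x
  simp [PySem.Set.mem_ofList]
  tauto

-- '0123456789' as the char map of its digit list
theorem digits_decomp :
    (["0","1","2","3","4","5","6","7","8","9"] : List String)
      = (['0','1','2','3','4','5','6','7','8','9'] : List Char).map (fun d => String.ofList [d]) := by
  decide

-- per-row agreement of the two folds
theorem row_eq (row : List String) (c : Int) :
    ((["0","1","2","3","4","5","6","7","8","9"] : List String).foldl
        (fun (st : String × Int) (d : String) =>
          if PySem.Str.isIn d st.1 then (PySem.Str.replace st.1 d "", st.2 + 1) else st)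
        (row.headD "", c)).2
      = c + PySem.Set.len (PySem.Set.inter (PySem.Set.ofList (row.headD "").toList)
              (PySem.Set.ofList ("0123456789" : String).toList)) := by
  rw [digits_decomp, innerA_sim, innerC_count _ (by decide), count_eq _ _ (by decide)]
  rfl

-- ===== VERDICT (by name: the statement is the Claim_ definition above) =====
-- ===== VERDICT (by name: the statement is the Claim_ definition above) =====
theorem rem_num_spec : Claim_equal_rem_num := by
  intro list _ _
  have hf : (fun (count : Int) (row : List String) =>
      ((["0","1","2","3","4","5","6","7","8","9"] : List String).foldl
        (fun (st : String × Int) (d : String) =>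
          if PySem.Str.isIn d st.1 then (PySem.Str.replace st.1 d "", st.2 + 1) else st)
        (row.headD "", count)).2)
    = (fun (count : Int) (row : List String) =>
      count + PySem.Set.len
          (PySem.Set.inter (PySem.Set.ofList (row.headD "").toList)
            (PySem.Set.ofList ("0123456789" : String).toList))) :=
    funext fun c => funext fun row => row_eq row c
  show List.foldl (fun (count : Int) (row : List String) =>
      ((["0","1","2","3","4","5","6","7","8","9"] : List String).foldl
        (fun (st : String × Int) (d : String) =>
          if PySem.Str.isIn d st.1 then (PySem.Str.replace st.1 d "", st.2 + 1) else st)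
        (row.headD "", count)).2) 0 list
    = List.foldl (fun (count : Int) (row : List String) =>
      count + PySem.Set.len
          (PySem.Set.inter (PySem.Set.ofList (row.headD "").toList)
            (PySem.Set.ofList ("0123456789" : String).toList))) 0 list
  rw [hf]
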